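-- pv_equiv track=rewrite | github.com/duxinfeng0917/smart_ec | main.py | generate_test_asr_texts
-- ===== SOURCE A (Python) =====
-- from typing import List, Dict, Any, Optional, Union
--
-- def generate_test_asr_texts(count: int) -> List[str]:
--     """
--     生成固定的测试ASR文本数据
--
--     参数:
--         count: 需要生成的数据数量
--
--     返回:
--         List[str]: 测试ASR文本列表
--     """
--     # 基础测试文本列表
--     test_texts = [
--         "天猫精灵要一份大碗香浓皮蛋瘦肉粥。",
--         "我想听周杰伦的歌。",
--         "天猫精灵来份南瓜小米粥。",
--         "今天天气怎么样？",
--         "天猫精灵来份萝卜炖排骨汤。"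
--     ]
--
--     # 循环使用基础文本来生成所需数量的数据
--     result = []
--     for i in range(count):
--         result.append(test_texts[i % len(test_texts)])
--
--     return result
-- ===== SOURCE B (Python) =====
-- def generate_test_asr_texts(count):
--     test_texts = [
--         "天猫精灵要一份大碗香浓皮蛋瘦肉粥。",
--         "我想听周杰伦的歌。",
--         "天猫精灵来份南瓜小米粥。",
--         "今天天气怎么样？",
--         "天猫精灵来份萝卜炖排骨汤。",
--     ]
--     result = []
--     remaining = count
--     while remaining >= len(test_texts):
--         result.extend(test_texts)
--         remaining -= len(test_texts)
--     if remaining > 0: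
--         result.extend(test_texts[:remaining])
--     return result
-- ===== Notes on version B (the rewrite author's own statement) =====
-- stated objective: alternative
-- what changed: Replaces the per-index modulo append loop with a chunked while-loop that extends the result by whole copies of the base list (tracking a remaining counter) and finishes with one partial slice; no index arithmetic or modulo at all.
import Mathlib
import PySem

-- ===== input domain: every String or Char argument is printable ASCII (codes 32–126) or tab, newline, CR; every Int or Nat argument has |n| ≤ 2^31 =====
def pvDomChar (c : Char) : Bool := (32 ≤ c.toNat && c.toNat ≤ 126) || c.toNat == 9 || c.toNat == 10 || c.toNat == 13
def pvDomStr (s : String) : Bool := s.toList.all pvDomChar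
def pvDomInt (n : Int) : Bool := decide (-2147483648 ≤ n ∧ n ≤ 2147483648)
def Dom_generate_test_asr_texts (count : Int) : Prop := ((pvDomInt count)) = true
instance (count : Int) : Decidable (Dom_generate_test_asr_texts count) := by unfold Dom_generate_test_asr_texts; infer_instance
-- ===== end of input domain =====

-- B replaces A's per-index modulo append loop with a chunked while-loop: extend by whole
-- copies of the base list, then one final partial slice (alternative decomposition).

-- the fixed base test texts (same literal list in both Pythons)
def pvTestTexts : List String :=
  ["天猫精灵要一份大碗香浓皮蛋瘦肉粥。",
   "我想听周杰伦的歌。",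
   "天猫精灵来份南瓜小米粥。",
   "今天天气怎么样？",
   "天猫精灵来份萝卜炖排骨汤。"]

-- ===== PORT A =====
-- for i in range(count): result.append(test_texts[i % len(test_texts)])
def generate_test_asr_texts (count : Int) : List String :=
  (PySem.List.pyRange 0 count 1).foldl
    (fun result i => result ++ [PySem.List.pyGetD pvTestTexts (PySem.Int.mod i (pvTestTexts.length : Int)) ""])
    []

-- ===== PORT B =====
-- while remaining >= len(test_texts): result.extend(test_texts); remaining -= len(test_texts)
def pvLoopB (result : List String) (remaining : Int) : List String :=
  if h : remaining ≥ (pvTestTexts.length : Int) then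
    pvLoopB (result ++ pvTestTexts) (remaining - (pvTestTexts.length : Int))
  else if remaining > 0 then
    -- if remaining > 0: result.extend(test_texts[:remaining])
    result ++ PySem.List.slice pvTestTexts none (some remaining)
  else result
termination_by remaining.toNat
decreasing_by simp only [pvTestTexts, List.length] at h ⊢; omega

def generate_test_asr_texts_alt (count : Int) : List String :=
  pvLoopB [] count

-- ===== PRECONDITION & SPEC =====
def Spec_generate_test_asr_texts (count : Int) (out : List String) : Prop := out = generate_test_asr_texts_alt count
instance (count : Int) (out : List String) : Decidable (Spec_generate_test_asr_texts count out) := by unfold Spec_generate_test_asr_texts; infer_instance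

-- ===== CLAIM =====
def Claim_equal_generate_test_asr_texts : Prop := ∀ (count : Int), Dom_generate_test_asr_texts count → Spec_generate_test_asr_texts count (generate_test_asr_texts count)

-- ===== LEMMAS AND PROOFS =====

-- the common closed description: the first n elements of the 5-cycle
def pvCycle (n : Nat) : List String :=
  (List.range n).map (fun k => pvTestTexts.getD (k % 5) "")

lemma pvLen5 : ((pvTestTexts.length : Nat) : Int) = (5 : Int) := by decide

lemma pvCycle_add_five (j : Nat) : pvCycle (5 + j) = pvTestTexts ++ pvCycle j := by
  unfold pvCycle
  rw [List.range_add, List.map_append, List.map_map]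
  refine congrArg₂ (· ++ ·) (by decide) ?_
  refine List.map_congr_left ?_
  intro k _
  simp [Function.comp]

-- A's loop produces pvCycle
lemma portA_eq_cycle (count : Int) :
    generate_test_asr_texts count = pvCycle count.toNat := by
  unfold generate_test_asr_texts pvCycle
  rw [PySem.List.foldl_append_singleton_eq_map, PySem.List.pyRange_one]
  simp only [List.nil_append, List.map_map, Int.sub_zero]
  refine List.map_congr_left ?_
  intro k _
  simp only [Function.comp_apply, zero_add, pvLen5]
  have hmod : PySem.Int.mod ((k : Nat) : Int) ((5 : Nat) : Int) = ((k % 5 : Nat) : Int) :=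
    PySem.Int.mod_natCast k 5
  have h5 : ((5 : Nat) : Int) = (5 : Int) := by norm_num
  rw [← h5, hmod, PySem.List.pyGetD_natCast]

lemma pvCycle_small (n : Nat) (h : n ≤ 5) : pvCycle n = pvTestTexts.take n := by
  interval_cases n <;> decide

-- B's chunked loop produces result ++ pvCycle remaining.toNat
lemma pvLoopB_eq_cycle (remaining : Int) (result : List String) :
    pvLoopB result remaining = result ++ pvCycle remaining.toNat := by
  rw [pvLoopB]
  split_ifs with h1 h2
  · rw [pvLen5] at h1
    rw [pvLoopB_eq_cycle (remaining - (pvTestTexts.length : Int)) (result ++ pvTestTexts)]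
    have : remaining.toNat = 5 + (remaining - (pvTestTexts.length : Int)).toNat := by
      simp only [pvLen5] at *; omega
    rw [this, pvCycle_add_five, List.append_assoc]
  · rw [pvLen5] at h1
    rw [PySem.List.slice_to _ (by omega), pvCycle_small remaining.toNat (by omega)]
  · rw [pvLen5] at h1
    have : remaining.toNat = 0 := by omega
    rw [this]
    simp [pvCycle]
termination_by remaining.toNat
decreasing_by simp only [pvTestTexts, List.length, pvLen5] at h1 ⊢; omega

-- ===== VERDICT =====
theorem generate_test_asr_texts_spec : Claim_equal_generate_test_asr_texts := by
  intro count _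
  unfold Spec_generate_test_asr_texts generate_test_asr_texts_alt
  rw [portA_eq_cycle, pvLoopB_eq_cycle]
  simp
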